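-- pv_equiv track=rewrite | github.com/lamkapower/task3.1 | task3.1_json.py | listmerge
-- ===== SOURCE A (Python) =====
-- def sortByLength(inputStr):
--     return len(inputStr)
--
-- def listmerge(json_read):
--     merged_list=[]
--     for lst in json_read:
--         merged_list.extend(lst)
--     top_words = []
--     for num , value in enumerate(merged_list):
--         if len(value) > 6:
--             top_words.append(merged_list[num])
--     top_words.sort(key=sortByLength , reverse=True)
--     top_words = map(lambda x:x.lower(), top_words)
--     return top_words
-- ===== SOURCE B (Python) =====
-- def listmerge(json_read):
--     # Bucket by word length in one pass, then emit buckets in descending length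
--     # order (no comparison sort over the words; only the distinct lengths are sorted).
--     buckets = {}
--     for lst in json_read:
--         for w in lst:
--             n = len(w)
--             if n > 6:
--                 buckets.setdefault(n, []).append(w)
--     ordered = []
--     for k in sorted(buckets, reverse=True):
--         ordered.extend(buckets[k])
--     return map(lambda x: x.lower(), ordered)
-- ===== Notes on version B (the rewrite author's own statement) =====
-- stated objective: alternative
-- what changed: A flattens, filters via enumerate, then comparison-sorts all kept words by length (reverse, stable); B makes one pass bucketing each long word into a dict keyed by its length and concatenates the buckets in descending key order, so only the distinct lengths are sorted.
import Mathlib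
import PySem

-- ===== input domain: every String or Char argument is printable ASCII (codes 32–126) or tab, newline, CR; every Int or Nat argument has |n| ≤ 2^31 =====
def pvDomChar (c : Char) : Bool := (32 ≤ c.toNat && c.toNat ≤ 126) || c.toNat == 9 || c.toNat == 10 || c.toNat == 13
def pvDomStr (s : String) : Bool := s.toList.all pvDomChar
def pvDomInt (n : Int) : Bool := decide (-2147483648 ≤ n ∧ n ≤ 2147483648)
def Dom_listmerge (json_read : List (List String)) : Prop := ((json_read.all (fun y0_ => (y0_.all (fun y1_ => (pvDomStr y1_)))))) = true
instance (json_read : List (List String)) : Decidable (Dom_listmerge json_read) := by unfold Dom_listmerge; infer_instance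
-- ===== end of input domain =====

-- B buckets the long words by length in one pass and concatenates the buckets in
-- descending length order, instead of A's filter-then-comparison-sort; same result, different decomposition.
-- Both Pythons return a lazy map object; the equivalence is about the sequence of strings it yields.

-- ===== PORT A =====
def sortByLength (inputStr : String) : Int := PySem.Str.len inputStr

def listmerge (json_read : List (List String)) : List String :=
  let merged_list := json_read.foldl (fun acc lst => acc ++ lst) []
  -- for num, value in enumerate(merged_list): if len(value) > 6: top_words.append(merged_list[num])
  -- (the index 'num' from enumerate is always in range, so pyGetD's default is never used)
  let top_words := (PySem.List.enumerate merged_list 0).foldl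
    (fun acc nv => if PySem.Str.len nv.2 > 6 then acc ++ [PySem.List.pyGetD merged_list nv.1 ""] else acc) []
  let top_words := PySem.List.sorted top_words sortByLength true
  top_words.map (fun x => PySem.Str.lower x)

-- ===== PORT B =====
def listmerge_alt (json_read : List (List String)) : List String :=
  -- buckets.setdefault(n, []).append(w)  ==  buckets[n] = buckets.get(n, []) + [w]  ==  Dict.modify
  let buckets := json_read.foldl (fun d lst =>
      lst.foldl (fun d w =>
        let n := PySem.Str.len w
        if n > 6 then d.modify n [] (fun b => b ++ [w]) else d) d)
    (PySem.Dict.empty : PySem.Dict Int (List String))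
  let ordered := (PySem.List.sorted buckets.keys (fun k => k) true).foldl
      (fun acc k => acc ++ buckets.getD k []) []
  ordered.map (fun x => PySem.Str.lower x)

-- ===== PRECONDITION & SPEC =====
def Spec_listmerge (json_read : List (List String)) (out : List String) : Prop := out = listmerge_alt json_read
instance (json_read : List (List String)) (out : List String) : Decidable (Spec_listmerge json_read out) := by unfold Spec_listmerge; infer_instance

-- ===== CLAIM (what is proved, stated in full; the proofs are below) =====
def Claim_equal_listmerge : Prop := ∀ (json_read : List (List String)), Dom_listmerge json_read → Spec_listmerge json_read (listmerge json_read)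

-- ===== LEMMAS AND PROOFS =====

-- insertBy passes over a prefix it does not go before
theorem pv_insertBy_append_not {α : Type} (b : α → α → Bool) (x : α) (ys zs : List α)
    (h : ∀ y ∈ ys, b x y = false) :
    PySem.List.insertBy b x (ys ++ zs) = ys ++ PySem.List.insertBy b x zs := by
  induction ys with
  | nil => simp
  | cons y ys ih =>
    have hy : b x y = false := h y (by simp)
    simp [PySem.List.insertBy, hy]
    exact ih (fun y hym => h y (by simp [hym]))

-- inserting one word into a descending-grouped list appends it to its length's bucket
theorem pv_insert_grouped (ks : List Int) (x : String) (xs' : List String)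
    (hp : ks.Pairwise (· > ·)) (hm : PySem.Str.len x ∈ ks) :
    PySem.List.insertBy (fun a b => decide (sortByLength b < sortByLength a)) x
        (ks.flatMap (fun k => xs'.filter (fun y => PySem.Str.len y == k)))
      = ks.flatMap (fun k => (xs' ++ [x]).filter (fun y => PySem.Str.len y == k)) := by
  induction ks with
  | nil => simp at hm
  | cons k ks ih =>
    have hgt : ∀ k' ∈ ks, k > k' := (List.pairwise_cons.mp hp).1
    simp only [List.flatMap_cons]
    by_cases hk : PySem.Str.len x = k
    · -- x lands at the end of the k-bucket, before everything in the tail buckets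
      have h1 : ∀ y ∈ xs'.filter (fun y => PySem.Str.len y == k),
          (fun a b => decide (sortByLength b < sortByLength a)) x y = false := by
        intro y hy
        have hyk := (List.mem_filter.mp hy).2
        simp only [beq_iff_eq] at hyk
        have hxy : PySem.Str.len y = PySem.Str.len x := by rw [hyk, hk]
        simp only [sortByLength, PySem.Str.len] at hxy ⊢
        simp only [decide_eq_false_iff_not, not_lt]
        omega
      rw [pv_insertBy_append_not _ _ _ _ h1]
      have h2 : PySem.List.insertBy (fun a b => decide (sortByLength b < sortByLength a)) x
          (ks.flatMap (fun k => xs'.filter (fun y => PySem.Str.len y == k)))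
          = x :: ks.flatMap (fun k => xs'.filter (fun y => PySem.Str.len y == k)) := by
        cases hzs : ks.flatMap (fun k => xs'.filter (fun y => PySem.Str.len y == k)) with
        | nil => simp [PySem.List.insertBy]
        | cons z zs =>
          have hz : z ∈ ks.flatMap (fun k => xs'.filter (fun y => PySem.Str.len y == k)) := by
            rw [hzs]; simp
          obtain ⟨k', hk', hzf⟩ := List.mem_flatMap.mp hz
          have hzk : PySem.Str.len z = k' := by
            have := (List.mem_filter.mp hzf).2; simpa using this
          have hlt : PySem.Str.len z < PySem.Str.len x := by
            rw [hzk, hk]; exact hgt k' hk'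
          have hb : (decide (sortByLength z < sortByLength x)) = true := by
            simp only [sortByLength, PySem.Str.len] at hlt ⊢
            simp only [decide_eq_true_eq]; omega
          simp [PySem.List.insertBy, hb]
      rw [h2]
      have h3 : ∀ k' ∈ ks, (xs' ++ [x]).filter (fun y => PySem.Str.len y == k')
          = xs'.filter (fun y => PySem.Str.len y == k') := by
        intro k' hk'
        rw [List.filter_append]
        have hne : PySem.Str.len x ≠ k' := by
          have := hgt k' hk'; omega
        have hne2 : ¬ ((x.length : Int) = k') := by simpa using hne
        simp [hne2]
      rw [List.flatMap_congr h3, List.filter_append]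
      have hk2 : ((x.length : Int) = k) := by simpa using hk
      simp [hk2]
    · -- x's bucket is further down; skip the k-bucket
      have hm' : PySem.Str.len x ∈ ks := by
        rcases List.mem_cons.mp hm with h | h
        · exact absurd h hk
        · exact h
      have hlt : PySem.Str.len x < k := hgt _ hm'
      have h1 : ∀ y ∈ xs'.filter (fun y => PySem.Str.len y == k),
          (fun a b => decide (sortByLength b < sortByLength a)) x y = false := by
        intro y hy
        have hyk := (List.mem_filter.mp hy).2
        simp only [beq_iff_eq] at hyk
        simp only [sortByLength, PySem.Str.len] at hyk hlt ⊢
        simp only [decide_eq_false_iff_not, not_lt]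
        omega
      rw [pv_insertBy_append_not _ _ _ _ h1, ih hp.of_cons hm']
      have hfx : (xs' ++ [x]).filter (fun y => PySem.Str.len y == k)
          = xs'.filter (fun y => PySem.Str.len y == k) := by
        rw [List.filter_append]
        have hk2 : ¬ ((x.length : Int) = k) := by simpa using hk
        simp [hk2]
      rw [hfx]

-- the whole stable reverse insertion sort produces the descending bucket concatenation
theorem pv_foldl_insertBy_grouped (xs : List String) (ks : List Int)
    (hp : ks.Pairwise (· > ·)) (hmem : ∀ x ∈ xs, PySem.Str.len x ∈ ks) :
    xs.foldl (fun acc x => PySem.List.insertBy (fun a b => decide (sortByLength b < sortByLength a)) x acc) []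
      = ks.flatMap (fun k => xs.filter (fun y => PySem.Str.len y == k)) := by
  induction xs using List.reverseRecOn with
  | nil => simp
  | append_singleton xs x ih =>
    rw [List.foldl_append]
    simp only [List.foldl_cons, List.foldl_nil]
    rw [ih (fun y hy => hmem y (by simp [hy]))]
    exact pv_insert_grouped ks x xs hp (hmem x (by simp))

theorem pv_sorted_rev_len (ws : List String) (ks : List Int)
    (hp : ks.Pairwise (· > ·)) (hmem : ∀ x ∈ ws, PySem.Str.len x ∈ ks) :
    PySem.List.sorted ws sortByLength true
      = ks.flatMap (fun k => ws.filter (fun y => PySem.Str.len y == k)) := by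
  rw [PySem.List.sorted_rev_eq_foldl_insertBy]
  exact pv_foldl_insertBy_grouped ws ks hp hmem

-- the descending list of distinct lengths of ws
theorem pv_ks_pairwise (ws : List String) :
    (PySem.List.sorted (PySem.Set.ofList (ws.map PySem.Str.len)) (fun k => k) true).Pairwise (· > ·) := by
  have h1 := PySem.List.sorted_pairwise_rev (PySem.Set.ofList (ws.map PySem.Str.len)) (fun k => (k : Int))
  have h2 : (PySem.List.sorted (PySem.Set.ofList (ws.map PySem.Str.len)) (fun k => (k : Int)) true).Nodup :=
    (PySem.List.sorted_perm _ _ _).nodup_iff.mpr (PySem.Set.nodup_ofList _)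
  exact (h1.and h2).imp (by rintro a b ⟨hle, hne⟩; omega)

theorem pv_A_eq (json_read : List (List String)) :
    listmerge json_read
      = (PySem.List.sorted ((json_read.flatten).filter (fun w => decide (PySem.Str.len w > 6))) sortByLength true).map
          (fun x => PySem.Str.lower x) := by
  simp only [listmerge]
  have hmerged : json_read.foldl (fun acc lst => acc ++ lst) [] = json_read.flatten := by
    rw [PySem.List.foldl_append_eq_flatten]; simp
  rw [hmerged]
  have hcongr : (PySem.List.enumerate json_read.flatten 0).foldl
      (fun acc nv => if PySem.Str.len nv.2 > 6 then acc ++ [PySem.List.pyGetD json_read.flatten nv.1 ""] else acc) []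
      = (PySem.List.enumerate json_read.flatten 0).foldl
      (fun acc nv => if PySem.Str.len nv.2 > 6 then acc ++ [nv.2] else acc) [] := by
    apply PySem.List.foldl_congr_mem
    intro acc nv hnv
    obtain ⟨k, hk, rfl⟩ := (PySem.List.mem_enumerate_iff _ _ _).mp hnv
    have : PySem.List.pyGetD json_read.flatten (0 + (k : Int)) "" = json_read.flatten[k] := by
      rw [zero_add, PySem.List.pyGetD_natCast, List.getD_eq_getElem _ _ hk]
    rw [this]
  rw [hcongr]
  have hsnd : (PySem.List.enumerate json_read.flatten 0).foldl
      (fun acc nv => if PySem.Str.len nv.2 > 6 then acc ++ [nv.2] else acc) []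
      = (json_read.flatten).foldl (fun acc v => if PySem.Str.len v > 6 then acc ++ [v] else acc) [] := by
    rw [← PySem.List.map_snd_enumerate json_read.flatten 0, List.foldl_map]
    simp [PySem.List.map_snd_enumerate]
  rw [hsnd, PySem.List.foldl_append_ite_eq_filter (fun v => PySem.Str.len v > 6)]
  simp

theorem pv_B_eq (json_read : List (List String)) :
    listmerge_alt json_read
      = ((PySem.List.sorted (PySem.Set.ofList (((json_read.flatten).filter (fun w => decide (PySem.Str.len w > 6))).map PySem.Str.len)) (fun k => k) true).flatMap
          (fun k => ((json_read.flatten).filter (fun w => decide (PySem.Str.len w > 6))).filter (fun y => PySem.Str.len y == k))).map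
          (fun x => PySem.Str.lower x) := by
  simp only [listmerge_alt]
  have hbkt : json_read.foldl (fun d lst =>
      lst.foldl (fun d w =>
        let n := PySem.Str.len w
        if n > 6 then d.modify n [] (fun b => b ++ [w]) else d) d)
      (PySem.Dict.empty : PySem.Dict Int (List String))
      = ((json_read.flatten).filter (fun w => decide (PySem.Str.len w > 6))).foldl
          (fun d w => d.modify (PySem.Str.len w) [] (fun b => b ++ [w])) PySem.Dict.empty := by
    rw [← List.foldl_flatten, PySem.List.foldl_ite_eq_foldl_filter (fun w => PySem.Str.len w > 6)]
  rw [hbkt]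
  set ws := (json_read.flatten).filter (fun w => decide (PySem.Str.len w > 6)) with hws
  have hkeys : (ws.foldl (fun d w => d.modify (PySem.Str.len w) [] (fun b => b ++ [w]))
      (PySem.Dict.empty : PySem.Dict Int (List String))).keys
      = PySem.Set.ofList (ws.map PySem.Str.len) := by
    rw [PySem.Dict.keys_foldl_modify_key ws PySem.Str.len [] (fun _ w => (fun b => b ++ [w]))]
    rw [PySem.Dict.keys_empty, PySem.Set.ofList_eq_foldl]
    rfl
  have hgetD : ∀ k : Int, (ws.foldl (fun d w => d.modify (PySem.Str.len w) [] (fun b => b ++ [w]))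
      (PySem.Dict.empty : PySem.Dict Int (List String))).getD k []
      = ws.filter (fun y => PySem.Str.len y == k) := by
    intro k
    have := PySem.Dict.getD_foldl_modify_append (ws.map (fun w => (PySem.Str.len w, w)))
      (PySem.Dict.empty : PySem.Dict Int (List String)) k
    rw [List.foldl_map] at this
    simp only [PySem.Dict.getD_empty, List.nil_append] at this
    rw [this, List.filter_map, List.map_map]
    simp [Function.comp_def]
  rw [hkeys]
  rw [PySem.List.foldl_append_eq_flatMap, List.nil_append]
  congr 1
  exact List.flatMap_congr (fun k _ => hgetD k)

-- ===== VERDICT (by name: the statement is the Claim_ definition above) =====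
theorem listmerge_spec : Claim_equal_listmerge := by
  intro json_read _
  unfold Spec_listmerge
  rw [pv_A_eq, pv_B_eq]
  set ws := (json_read.flatten).filter (fun w => decide (PySem.Str.len w > 6)) with hws
  congr 1
  apply pv_sorted_rev_len
  · exact pv_ks_pairwise ws
  · intro x hx
    rw [PySem.List.mem_sorted, PySem.Set.mem_ofList]
    exact List.mem_map_of_mem hx
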